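-- pv_equiv track=rewrite | github.com/yooshinK/python_study | Algorithm_py_Sum.py | sum_for
-- ===== SOURCE A (Python) =====
-- def sum_for(n):
--     s = 0
--     if n > 0:
--         for i in range(1, n + 1):
--             s = s + i
--     elif n < 0:
--         for i in range(n,1):
--             s = s + i
--     else:
--         return 0
--     return s
-- ===== SOURCE B (Python) =====
-- def sum_for(n):
--     if n > 0:
--         return n * (n + 1) // 2
--     if n < 0:
--         return n * (1 - n) // 2
--     return 0
-- ===== Notes on version B (the rewrite author's own statement) =====
-- stated objective: faster
-- what changed: Replaces the O(n) summation loops with closed-form arithmetic-series formulas for each sign branch.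
import Mathlib
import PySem

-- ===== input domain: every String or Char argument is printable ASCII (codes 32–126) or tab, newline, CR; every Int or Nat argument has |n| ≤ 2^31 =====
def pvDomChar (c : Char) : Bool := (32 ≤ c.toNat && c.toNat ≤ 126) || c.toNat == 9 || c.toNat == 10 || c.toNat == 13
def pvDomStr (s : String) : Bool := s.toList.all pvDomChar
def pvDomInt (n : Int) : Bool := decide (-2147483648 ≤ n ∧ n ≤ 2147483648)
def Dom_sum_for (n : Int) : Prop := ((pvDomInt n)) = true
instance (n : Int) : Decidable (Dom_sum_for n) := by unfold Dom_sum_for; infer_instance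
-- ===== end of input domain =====

-- B replaces A's O(|n|) summation loops with closed-form arithmetic-series formulas (equal return value).

-- ===== PORT A =====
def sum_for (n : Int) : Int :=
  if n > 0 then
    (PySem.List.pyRange 1 (n + 1) 1).foldl (fun s i => s + i) 0
  else if n < 0 then
    (PySem.List.pyRange n 1 1).foldl (fun s i => s + i) 0
  else 0

-- ===== PORT B =====
def sum_for_alt (n : Int) : Int :=
  if n > 0 then PySem.Int.floordiv (n * (n + 1)) 2
  else if n < 0 then PySem.Int.floordiv (n * (1 - n)) 2
  else 0

-- ===== PRECONDITION & SPEC =====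
def Spec_sum_for (n : Int) (out : Int) : Prop := out = sum_for_alt n
instance (n : Int) (out : Int) : Decidable (Spec_sum_for n out) := by unfold Spec_sum_for; infer_instance

-- ===== CLAIM (what is proved, stated in full; the proofs are below) =====
def Claim_equal_sum_for : Prop := ∀ (n : Int), Dom_sum_for n → Spec_sum_for n (sum_for n)

-- ===== LEMMAS AND PROOFS =====

theorem foldl_add_sum (l : List Int) (s : Int) :
    l.foldl (fun s i => s + i) s = s + l.sum := by
  induction l generalizing s with
  | nil => simp
  | cons x xs ih => simp [List.foldl, ih, List.sum_cons]; ring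

theorem sum_pos_range (m : Nat) :
    2 * (PySem.List.pyRange 1 ((m : Int) + 1) 1).sum = (m : Int) * ((m : Int) + 1) := by
  induction m with
  | zero => simp [PySem.List.pyRange_one_eq_nil]
  | succ k ih =>
    have h : PySem.List.pyRange 1 ((k : Int) + 1 + 1) 1
        = PySem.List.pyRange 1 ((k : Int) + 1) 1 ++ [(k : Int) + 1] :=
      PySem.List.pyRange_one_succ_right (by omega)
    push_cast
    rw [h, List.sum_append]
    push_cast at ih
    simp only [List.sum_cons, List.sum_nil]
    nlinarith

theorem sum_neg_range (m : Nat) :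
    2 * (PySem.List.pyRange (-(m : Int)) 1 1).sum = (-(m : Int)) * (1 - (-(m : Int))) := by
  induction m with
  | zero => decide
  | succ k ih =>
    have h : PySem.List.pyRange (-((k : Int) + 1)) 1 1
        = (-((k : Int) + 1)) :: PySem.List.pyRange (-((k : Int) + 1) + 1) 1 1 :=
      PySem.List.pyRange_one_cons (by omega)
    have he : -((k : Int) + 1) + 1 = -(k : Int) := by omega
    push_cast
    rw [h, he, List.sum_cons]
    nlinarith

theorem double_half (s a : Int) (h : 2 * s = a) : PySem.Int.floordiv a 2 = s := by
  rw [PySem.Int.floordiv_eq_ediv_of_pos (by omega), ← h]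
  exact Int.mul_ediv_cancel_left s (by omega)

-- ===== VERDICT (by name: the statement is the Claim_ definition above) =====
theorem sum_for_spec : Claim_equal_sum_for := by
  intro n _
  unfold Spec_sum_for sum_for sum_for_alt
  by_cases hp : n > 0
  · simp only [hp, if_pos]
    rw [foldl_add_sum]
    obtain ⟨m, rfl⟩ : ∃ m : Nat, n = (m : Int) := ⟨n.toNat, by omega⟩
    rw [double_half _ _ (sum_pos_range m)]
    ring
  · by_cases hn : n < 0
    · simp only [hp, hn, if_neg, if_pos, not_false_iff]
      rw [foldl_add_sum]
      obtain ⟨m, rfl⟩ : ∃ m : Nat, n = -(m : Int) := ⟨(-n).toNat, by omega⟩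
      rw [double_half _ _ (sum_neg_range m)]
      ring
    · simp [hp, hn]
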